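-- pv_equiv track=rewrite | github.com/miyamoto120/Foobar-with-Google | Extra/Disorderly Escape (Level 5)/solution.py | solution
-- ===== SOURCE A (Python) =====
-- def solution(w, h, s):
--     def factorial(n):
--         if n == 0:
--             return 1
--         else:
--             return n * factorial(n - 1)
--
--     def Counter(iterable):
--         count_dict = {}
--         for item in iterable:
--             if item in count_dict:
--                 count_dict[item] += 1
--             else:
--                 count_dict[item] = 1
--         return count_dict
--
--     def gcd(a,b):
--         while b:
--             a, b = b, a % b
--         return a
--
--     def partition(n, m=None):
--         if m is None:
--             m = n
--         if n == 0:
--             return [[]]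
--         if n < 0 or m == 0:
--             return []
--
--         partitions = []
--         for i in range(min(n, m), 0, -1):
--             sub_partitions = partition(n - i, i)
--             for sub_partition in sub_partitions:
--                 partitions.append([i] + sub_partition)
--
--         return partitions
--
--     def cy(y,n):
--         counted_y = Counter(y)
--         unique_y = list(set(y))
--         conjugacy = factorial(n)
--         for i in unique_y:
--             conjugacy //= ((i**counted_y[i])*factorial(counted_y[i]))
--         return conjugacy
--
--     partition_w = partition(w)
--     partition_h = partition(h)
--     total = 0
--     for part_w in partition_w:
--         for part_h in partition_h:
--             cy1 = cy(part_w,w)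
--             cy2 = cy(part_h,h)
--             exp_sum = 0
--             for y1 in part_w:
--                 for y2 in part_h:
--                     exp_sum += gcd(y1,y2)
--             total += cy1*cy2*(s**exp_sum)
--
--     return str(total//(factorial(w)*factorial(h)))
-- ===== SOURCE B (Python) =====
-- def solution(w, h, s):
--     # Different algorithm: instead of recursively enumerating partitions and
--     # computing each conjugacy-class size by the factorial/product formula,
--     # build by dynamic programming, for m = 1..n, a dictionary mapping each
--     # cycle type (descending tuple) of S_m to the NUMBER of permutations with
--     # that type, via the recurrence "element m lies in a cycle of length l:
--     # (m-1)(m-2)...(m-l+1) ways times the count for S_{m-l}".  n! is recovered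
--     # as the sum of all counts, so no factorial function is needed at all.
--     def gcd(a, b):
--         while b:
--             a, b = b, a % b
--         return a
--
--     def cycle_type_counts(n):
--         # table[m]: {descending cycle-type tuple of S_m: number of permutations}
--         table = [{(): 1}]
--         for m in range(1, n + 1):
--             cur = {}
--             for l in range(1, m + 1):
--                 ways = 1
--                 for j in range(m - l + 1, m):
--                     ways *= j
--                 for t, c in table[m - l].items():
--                     nt = tuple(sorted(t + (l,), reverse=True))
--                     cur[nt] = cur.get(nt, 0) + ways * c
--             table.append(cur)
--         return table[n]
--
--     rows = cycle_type_counts(w)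
--     cols = cycle_type_counts(h)
--     fw = sum(rows.values())   # = w!
--     fh = sum(cols.values())   # = h!
--     total = 0
--     for t1, c1 in rows.items():
--         for t2, c2 in cols.items():
--             e = 0
--             for a in t1:
--                 for b in t2:
--                     e += gcd(a, b)
--             total += c1 * c2 * s ** e
--     return str(total // (fw * fh))
-- ===== Notes on version B (the rewrite author's own statement) =====
-- stated objective: alternative
-- what changed: B replaces A's recursive partition enumeration plus factorial/product conjugacy-class-size formula by a dynamic program that builds, for m = 1..n, a dictionary from cycle type to the NUMBER of permutations of S_m with that type (recurrence on the cycle containing the largest element), recovers n! as the sum of those counts (no factorial function at all), and sums c1*c2*s**e over the two tables.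
import Mathlib
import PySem

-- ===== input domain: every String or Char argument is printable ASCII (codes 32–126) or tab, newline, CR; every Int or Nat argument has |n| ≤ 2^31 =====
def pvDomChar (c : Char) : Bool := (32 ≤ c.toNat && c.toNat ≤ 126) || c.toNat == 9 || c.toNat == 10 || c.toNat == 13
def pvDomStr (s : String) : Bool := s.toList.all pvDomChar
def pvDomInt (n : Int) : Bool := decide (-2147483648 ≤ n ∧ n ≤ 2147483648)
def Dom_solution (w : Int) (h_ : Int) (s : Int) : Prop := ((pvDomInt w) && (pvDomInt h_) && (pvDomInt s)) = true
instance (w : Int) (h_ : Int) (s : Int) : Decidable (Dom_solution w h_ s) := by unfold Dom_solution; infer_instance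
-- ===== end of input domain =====

-- B replaces A's recursive partition enumeration and factorial/product class-size formula by a
-- dynamic program counting permutations per cycle type (and recovers n! as the sum of the counts).

-- ===== PORT A =====
-- shared helper: both Pythons contain this identical gcd (while b: a, b = b, a % b).
-- fuel = b.natAbs + 1 suffices since |a % b| < |b| for b ≠ 0, so the 0-fuel arm is unreachable.
def pyGcdGo : Nat → Int → Int → Int
  | 0, a, _ => a
  | fuel + 1, a, b => if b = 0 then a else pyGcdGo fuel b (PySem.Int.mod a b)
def pyGcd (a b : Int) : Int := pyGcdGo (b.natAbs + 1) a b

-- A's recursive partition generator. fuel = n.toNat + 1 suffices: every recursive call strictly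
-- decreases n.toNat (1 ≤ i ≤ n there), so the 0-fuel arm is unreachable.
def partitionGo : Nat → Int → Int → List (List Int)
  | 0, _, _ => []
  | fuel + 1, n, m =>
    if n = 0 then [[]]
    else if n < 0 ∨ m = 0 then []
    else (PySem.List.pyRange (min n m) 0 (-1)).foldl
      (fun acc i => acc ++ (partitionGo fuel (n - i) i).map (fun sub => i :: sub)) []
def partitionP (n m : Int) : List (List Int) := partitionGo (n.toNat + 1) n m

-- A's recursive factorial; Python diverges for n < 0 (never reached under Pre_),
-- the n ≤ 0 guard makes the port total — exact for every n ≥ 0.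
def factA (n : Int) : Int :=
  if n ≤ 0 then 1 else n * factA (n - 1)
termination_by n.toNat
decreasing_by omega

-- A's hand-written Counter (dict loop: if item in d: d[item] += 1 else d[item] = 1)
def counterA (y : List Int) : PySem.Dict Int Int :=
  y.foldl (fun d x => if d.contains x then d.modify x 0 (· + 1) else d.insert x 1)
    PySem.Dict.empty

-- A's cy: iterates list(set(y)); the sequential exact divisions are order-independent
-- (⌊⌊N/d₁⌋/d₂⌋ = ⌊N/(d₁d₂)⌋ for positive divisors), so consuming PySem.Set order is exact.
-- counted_y[i] never raises (i ∈ y) and is ≥ 1, so getD _ 0 and the .toNat exponent are exact.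
def cyA (y : List Int) (n : Int) : Int :=
  let counted := counterA y
  let uniq : PySem.Set Int := PySem.Set.ofList y
  uniq.foldl
    (fun conj i =>
      PySem.Int.floordiv conj (i ^ (counted.getD i 0).toNat * factA (counted.getD i 0)))
    (factA n)

-- exp_sum is a sum of gcds of positive ints, hence ≥ 0: s ** exp_sum is s ^ exp_sum.toNat
def solution (w : Int) (h_ : Int) (s : Int) : String :=
  let partition_w := partitionP w w
  let partition_h := partitionP h_ h_
  let total := partition_w.foldl (fun tot part_w =>
    partition_h.foldl (fun tot part_h =>
      let cy1 := cyA part_w w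
      let cy2 := cyA part_h h_
      let exp_sum := part_w.foldl (fun e y1 =>
        part_h.foldl (fun e y2 => e + pyGcd y1 y2) e) 0
      tot + cy1 * cy2 * s ^ exp_sum.toNat) tot) 0
  PySem.Int.toStr (PySem.Int.floordiv total (factA w * factA h_))

-- ===== PORT B =====
-- ways = (m-1)(m-2)...(m-l+1): the 'for j in range(m-l+1, m): ways *= j' loop
def waysB (m l : Int) : Int :=
  (PySem.List.pyRange (m - l + 1) m 1).foldl (fun r j => r * j) 1

-- one iteration of B's DP: the cycle-type-count dictionary for S_m from the table so far.
-- table[m-l] is always a valid index in the Python (1 ≤ l ≤ m ≤ len(table)); the getD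
-- default of pyGet? is therefore never used on the inputs reached under Pre_.
def stepB (table : List (PySem.Dict (List Int) Int)) (m : Int) : PySem.Dict (List Int) Int :=
  (PySem.List.pyRange 1 (m + 1) 1).foldl (fun cur l =>
    let ways := waysB m l
    (((PySem.List.pyGet? table (m - l)).getD PySem.Dict.empty).items).foldl
      (fun cur tc =>
        let nt := PySem.List.sorted (tc.1 ++ [l]) (fun x => x) true
        cur.insert nt (cur.getD nt 0 + ways * tc.2))
      cur)
    PySem.Dict.empty

-- B's cycle_type_counts: grow the table with a fold, then return table[n]
-- (in range for n ≥ 0, the only case reached under Pre_).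
def cycleTypeCounts (n : Int) : PySem.Dict (List Int) Int :=
  let table := (PySem.List.pyRange 1 (n + 1) 1).foldl
      (fun tb m => tb ++ [stepB tb m]) [PySem.Dict.empty.insert ([] : List Int) 1]
  (PySem.List.pyGet? table n).getD PySem.Dict.empty

-- e is a sum of gcds of positive ints, hence ≥ 0: s ** e is s ^ e.toNat
def solution_alt (w : Int) (h_ : Int) (s : Int) : String :=
  let rows := cycleTypeCounts w
  let cols := cycleTypeCounts h_
  let fw := rows.values.foldl (· + ·) 0
  let fh := cols.values.foldl (· + ·) 0
  let total := rows.items.foldl (fun tot tc1 =>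
    cols.items.foldl (fun tot tc2 =>
      let e := tc1.1.foldl (fun e a => tc2.1.foldl (fun e b => e + pyGcd a b) e) 0
      tot + tc1.2 * tc2.2 * s ^ e.toNat) tot) 0
  PySem.Int.toStr (PySem.Int.floordiv total (fw * fh))

-- ===== PRECONDITION & SPEC =====
-- A's recursive factorial(w), factorial(h) recurse forever (RecursionError) for negative
-- arguments, so Pre_ keeps exactly the inputs on which A returns: both dimensions nonnegative.
def Pre_solution (w : Int) (h_ : Int) (s : Int) : Prop := 0 ≤ w ∧ 0 ≤ h_
instance (w : Int) (h_ : Int) (s : Int) : Decidable (Pre_solution w h_ s) := by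
  unfold Pre_solution; infer_instance

def pvWitness_solution : Int × Int × Int := (2, 2, 3)

def Spec_solution (w : Int) (h_ : Int) (s : Int) (out : String) : Prop := out = solution_alt w h_ s
instance (w : Int) (h_ : Int) (s : Int) (out : String) : Decidable (Spec_solution w h_ s out) := by unfold Spec_solution; infer_instance

-- ===== CLAIM (what is proved, stated in full; the proofs are below) =====
def Claim_equal_solution : Prop := ∀ (w : Int) (h_ : Int) (s : Int), Dom_solution w h_ s → Pre_solution w h_ s → Spec_solution w h_ s (solution w h_ s)

-- ===== LEMMAS AND PROOFS =====

-- integer factorial, the common value of both sides' factorials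
def fI (k : Nat) : Int := (Nat.factorial k : Int)

-- "t is a partition of n": positive parts, weakly decreasing, summing to n
def isPart (n : Int) (t : List Int) : Prop :=
  (∀ x ∈ t, 1 ≤ x) ∧ t.Pairwise (fun a b => b ≤ a) ∧ t.sum = n

-- the class-size denominator z(t) = (∏ parts) · ∏_v (mult of v)!
def zf (t : List Int) : Int := t.prod * ∏ v ∈ t.toFinset, fI (t.count v)

-- clean model of B's table: dpTab m = the table after m DP iterations
def dpTab : Nat → List (PySem.Dict (List Int) Int)
  | 0 => [PySem.Dict.empty.insert ([] : List Int) 1]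
  | m + 1 => dpTab m ++ [stepB (dpTab m) ((m : Int) + 1)]

def dpD : Nat → PySem.Dict (List Int) Int
  | 0 => PySem.Dict.empty.insert ([] : List Int) 1
  | m + 1 => stepB (dpTab m) ((m : Int) + 1)

-- the flat list of (key, contribution) pairs that B's step m+1 accumulates
def contribs (m : Nat) : List (List Int × Int) :=
  (PySem.List.pyRange 1 ((m : Int) + 1 + 1) 1).flatMap (fun l =>
    (dpD (m + 1 - l.toNat)).items.map (fun tc =>
      (PySem.List.sorted (tc.1 ++ [l]) (fun x => x) true, waysB ((m : Int) + 1) l * tc.2)))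

-- the generic accumulate-into-dict loop
def upsert {κ : Type} [BEq κ] (d : PySem.Dict κ Int) (p : κ × Int) : PySem.Dict κ Int :=
  d.insert p.1 (d.getD p.1 0 + p.2)

theorem factA_natCast (k : Nat) : factA (k : Int) = fI k := by
  induction k with
  | zero => rw [factA]; simp [fI]
  | succ k ih =>
    rw [factA, if_neg (by push_cast; omega : ¬ ((↑(k+1):Int) ≤ 0))]
    have hrw : ((↑(k+1):Int)) - 1 = (k:Int) := by push_cast; ring
    rw [hrw, ih, fI, fI, Nat.factorial_succ]
    push_cast; ring

theorem foldl_mul_int (L : List Int) (a : Int) : L.foldl (fun r j => r * j) a = a * L.prod := by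
  induction L generalizing a with
  | nil => simp
  | cons x t ih => simp [List.foldl_cons, ih, mul_assoc]

theorem length_le_sum (t : List Int) (h1 : ∀ x ∈ t, 1 ≤ x) : (t.length : Int) ≤ t.sum := by
  induction t with
  | nil => simp
  | cons a r ih =>
    have h2 := ih (fun y hy => h1 y (List.mem_cons_of_mem a hy))
    have h3 := h1 a List.mem_cons_self
    simp only [List.sum_cons, List.length_cons]; push_cast; omega

theorem elem_le_sum (t : List Int) (h1 : ∀ x ∈ t, 1 ≤ x) (x : Int) (hx : x ∈ t) : x ≤ t.sum := by
  have hp := List.perm_cons_erase hx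
  have hsum : t.sum = x + (t.erase x).sum := by rw [hp.sum_eq]; simp
  have h2 : ∀ y ∈ t.erase x, (1:Int) ≤ y := fun y hy => h1 y (List.mem_of_mem_erase hy)
  have h3 := length_le_sum _ h2
  have h4 : (0:Int) ≤ ((t.erase x).length : Int) := by positivity
  omega

theorem isPart_zero (t : List Int) : isPart 0 t ↔ t = [] := by
  constructor
  · rintro ⟨h1, _, hs⟩
    cases t with
    | nil => rfl
    | cons a r =>
      have := length_le_sum (a :: r) h1
      simp [hs] at this
      omega
  · rintro rfl; exact ⟨by simp, by simp, by simp⟩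

theorem dpTab_eq (m : Nat) : dpTab m = (List.range (m + 1)).map dpD := by
  induction m with
  | zero => simp [dpTab, dpD, List.range_succ]
  | succ m ih =>
    show dpTab m ++ [stepB (dpTab m) ((m : Int) + 1)] = _
    rw [List.range_succ, List.map_append, ← ih]
    rfl

theorem dpTab_pyGet? (m j : Nat) (hj : j ≤ m) :
    PySem.List.pyGet? (dpTab m) ((j : Nat) : Int) = some (dpD j) := by
  rw [PySem.List.pyGet?_natCast, dpTab_eq]
  rw [List.getElem?_map]
  rw [List.getElem?_range (by omega)]
  rfl

theorem tableFold (k : Nat) :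
    (PySem.List.pyRange 1 ((k : Int) + 1) 1).foldl (fun tb m => tb ++ [stepB tb m])
      [PySem.Dict.empty.insert ([] : List Int) 1] = dpTab k := by
  induction k with
  | zero => rw [PySem.List.pyRange_one_eq_nil (by norm_num)]; rfl
  | succ k ih =>
    have h1 : ((k + 1 : Nat) : Int) + 1 = ((k : Int) + 1) + 1 := by push_cast; ring
    rw [h1, PySem.List.pyRange_one_succ_right (by omega : (1:Int) ≤ (k:Int)+1), List.foldl_append, ih]
    show dpTab k ++ [stepB (dpTab k) ((k:Int)+1)] = dpTab (k+1)
    rfl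

theorem cycleTypeCounts_eq (n : Int) (hn : 0 ≤ n) : cycleTypeCounts n = dpD n.toNat := by
  unfold cycleTypeCounts
  have hc : n = ((n.toNat : Nat) : Int) := by omega
  rw [hc, tableFold n.toNat]
  show (PySem.List.pyGet? (dpTab n.toNat) ((n.toNat : Nat) : Int)).getD PySem.Dict.empty
      = dpD (((n.toNat : Nat) : Int)).toNat
  rw [dpTab_pyGet? n.toNat n.toNat le_rfl]
  show dpD n.toNat = dpD ((n.toNat : Int)).toNat
  congr 1

theorem dpD_succ_eq (m : Nat) :
    dpD (m + 1) = (contribs m).foldl upsert PySem.Dict.empty := by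
  show stepB (dpTab m) ((m : Int) + 1) = _
  unfold stepB contribs
  rw [List.foldl_flatMap]
  apply PySem.List.foldl_congr_mem
  intro d l hl
  rw [PySem.List.mem_pyRange_one] at hl
  have hidx : ((m : Int) + 1) - l = ((m + 1 - l.toNat : Nat) : Int) := by omega
  rw [hidx, dpTab_pyGet? m (m + 1 - l.toNat) (by omega)]
  rw [List.foldl_map]
  rfl

theorem getD_foldl_upsert {κ : Type} [BEq κ] [LawfulBEq κ] [DecidableEq κ]
    (ps : List (κ × Int)) (d : PySem.Dict κ Int) (k : κ) :
    (ps.foldl upsert d).getD k 0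
      = d.getD k 0 + ((ps.filter (fun p => p.1 = k)).map (·.2)).sum := by
  induction ps generalizing d with
  | nil => simp
  | cons p rest ih =>
    rw [List.foldl_cons, ih]
    by_cases hk : p.1 = k
    · rw [List.filter_cons_of_pos (by simpa using hk)]
      show (d.insert p.1 (d.getD p.1 0 + p.2)).getD k 0 + _ = _
      rw [PySem.Dict.getD_insert, if_pos hk.symm, hk]
      simp only [List.map_cons, List.sum_cons]
      ring
    · rw [List.filter_cons_of_neg (by simpa using hk)]
      show (d.insert p.1 (d.getD p.1 0 + p.2)).getD k 0 + _ = _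
      rw [PySem.Dict.getD_insert, if_neg (fun h => hk h.symm)]

theorem keys_foldl_upsert {κ : Type} [BEq κ] [LawfulBEq κ] (ps : List (κ × Int)) :
    (ps.foldl upsert (PySem.Dict.empty : PySem.Dict κ Int)).keys
      = PySem.Set.ofList (ps.map (·.1)) := by
  show (ps.foldl (fun d x => d.insert x.1 ((fun (d : PySem.Dict κ Int) (x : κ × Int) => d.getD x.1 0 + x.2) d x)) PySem.Dict.empty).keys = _
  rw [PySem.Dict.keys_foldl_insert_key ps (·.1)]
  simp [PySem.Set.update_nil_left]

theorem nodup_keys_foldl_upsert {κ : Type} [BEq κ] [LawfulBEq κ] (ps : List (κ × Int)) :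
    (ps.foldl upsert (PySem.Dict.empty : PySem.Dict κ Int)).keys.Nodup := by
  rw [keys_foldl_upsert]
  exact PySem.Set.nodup_ofList _

theorem sum_ite_single {κ : Type} [DecidableEq κ] (S : List κ) (x : κ) (f : κ → Int)
    (hnd : S.Nodup) (hx : x ∈ S) :
    (S.map (fun v => if v = x then f v else 0)).sum = f x := by
  induction S with
  | nil => cases hx
  | cons a t ih =>
    by_cases hax : a = x
    · subst hax
      have hnt : a ∉ t := (List.nodup_cons.1 hnd).1
      simp [List.map_congr_left (fun v hv => if_neg (fun he : v = a => hnt (he ▸ hv)))]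
    · have hxt : x ∈ t := (List.mem_cons.1 hx).resolve_left (fun he => hax he.symm)
      simp only [List.map_cons, List.sum_cons, if_neg hax,
        ih (List.nodup_cons.1 hnd).2 hxt, zero_add]

-- total of per-key filtered sums over a nodup key list covering ps = total of ps values
theorem sum_filtered_by_keys {κ : Type} [DecidableEq κ] (ps : List (κ × Int)) (K : List κ)
    (hnd : K.Nodup) (hcov : ∀ p ∈ ps, p.1 ∈ K) :
    (K.map (fun k => ((ps.filter (fun p => p.1 = k)).map (·.2)).sum)).sum
      = (ps.map (·.2)).sum := by
  induction ps with
  | nil => simp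
  | cons p rest ih =>
    have hsplit : ∀ k, ((((p :: rest).filter (fun q => q.1 = k)).map (·.2)).sum : Int)
        = (if k = p.1 then p.2 else 0) + ((rest.filter (fun q => q.1 = k)).map (·.2)).sum := by
      intro k
      by_cases hk : p.1 = k
      · rw [List.filter_cons_of_pos (by simpa using hk), if_pos hk.symm]
        simp
      · rw [List.filter_cons_of_neg (by simpa using hk), if_neg (fun h => hk h.symm)]
        simp
    rw [List.map_congr_left (fun k _ => hsplit k)]
    rw [PySem.List.sum_map_add_int]
    rw [ih (fun q hq => hcov q (List.mem_cons_of_mem p hq))]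
    rw [sum_ite_single K p.1 (fun _ => p.2) hnd (hcov p List.mem_cons_self)]
    simp

theorem sum_values_foldl_upsert {κ : Type} [BEq κ] [LawfulBEq κ] [DecidableEq κ]
    (ps : List (κ × Int)) :
    ((ps.foldl upsert (PySem.Dict.empty : PySem.Dict κ Int)).values).sum
      = (ps.map (·.2)).sum := by
  set d := ps.foldl upsert (PySem.Dict.empty : PySem.Dict κ Int) with hd
  have hnd : d.keys.Nodup := nodup_keys_foldl_upsert ps
  rw [PySem.Dict.values_eq_map_keys d hnd 0]
  have hget : ∀ k ∈ d.keys, d.getD k 0 = ((ps.filter (fun p => p.1 = k)).map (·.2)).sum := by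
    intro k _
    rw [hd, getD_foldl_upsert]
    simp
  rw [List.map_congr_left hget]
  apply sum_filtered_by_keys ps d.keys hnd
  intro p hp
  rw [hd, keys_foldl_upsert]
  rw [PySem.Set.mem_ofList]
  exact List.mem_map_of_mem hp

theorem partitionGo_mem (fuel : Nat) : ∀ (n m : Int) (p : List Int), 0 ≤ n → n.toNat < fuel →
    (p ∈ partitionGo fuel n m ↔ isPart n p ∧ ∀ x ∈ p, x ≤ m) := by
  induction fuel with
  | zero => intro n m p hn hf; omega
  | succ fuel ih =>
    intro n m p hn hf
    by_cases hn0 : n = 0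
    · subst hn0
      show p ∈ (if (0:Int) = 0 then [[]] else _) ↔ _
      rw [if_pos rfl]
      simp only [List.mem_singleton]
      constructor
      · rintro rfl
        exact ⟨(isPart_zero []).2 rfl, by simp⟩
      · rintro ⟨hp, _⟩
        exact (isPart_zero p).1 hp
    · have hnpos : 0 < n := by omega
      show p ∈ (if n = 0 then [[]] else if n < 0 ∨ m = 0 then [] else _) ↔ _
      rw [if_neg hn0]
      by_cases hm0 : m = 0
      · rw [if_pos (Or.inr hm0)]
        simp only [List.not_mem_nil, false_iff]
        rintro ⟨⟨h1, _, hs⟩, hb⟩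
        cases p with
        | nil => simp at hs; omega
        | cons a r =>
          have := h1 a List.mem_cons_self
          have := hb a List.mem_cons_self
          omega
      · rw [if_neg (by push Not; exact ⟨by omega, hm0⟩)]
        rw [PySem.List.foldl_append_eq_flatMap, List.nil_append, List.mem_flatMap]
        constructor
        · rintro ⟨i, hi, hpi⟩
          rw [PySem.List.mem_pyRange_neg_one] at hi
          obtain ⟨hi0, hile⟩ := hi
          rw [List.mem_map] at hpi
          obtain ⟨sub, hsub, rfl⟩ := hpi
          have hile_n : i ≤ n := le_trans hile (min_le_left _ _)
          have hile_m : i ≤ m := le_trans hile (min_le_right _ _)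
          rw [ih (n - i) i sub (by omega) (by omega)] at hsub
          obtain ⟨⟨hall, hpair, hsum⟩, hbound⟩ := hsub
          refine ⟨⟨?_, ?_, ?_⟩, ?_⟩
          · intro x hx
            rcases List.mem_cons.1 hx with rfl | hx'
            · omega
            · exact hall x hx'
          · exact List.pairwise_cons.2 ⟨hbound, hpair⟩
          · simp only [List.sum_cons]; omega
          · intro x hx
            rcases List.mem_cons.1 hx with rfl | hx'
            · exact hile_m
            · exact le_trans (hbound x hx') hile_m
        · rintro ⟨⟨hall, hpair, hsum⟩, hbound⟩
          cases p with
          | nil => simp at hsum; omega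
          | cons x rest =>
            have hx1 : 1 ≤ x := hall x List.mem_cons_self
            have hxm : x ≤ m := hbound x List.mem_cons_self
            have hxn : x ≤ n := hsum ▸ elem_le_sum _ hall x List.mem_cons_self
            have hpc := List.pairwise_cons.1 hpair
            have hrs : (0:Int) ≤ rest.sum :=
              le_trans (by positivity) (length_le_sum rest (fun y hy => hall y (List.mem_cons_of_mem x hy)))
            have hsum2 : x + rest.sum = n := by simpa using hsum
            refine ⟨x, ?_, ?_⟩
            · rw [PySem.List.mem_pyRange_neg_one]
              exact ⟨by omega, le_min hxn hxm⟩
            · rw [List.mem_map]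
              refine ⟨rest, ?_, rfl⟩
              rw [ih (n - x) x rest (by omega) (by omega)]
              refine ⟨⟨fun y hy => hall y (List.mem_cons_of_mem x hy), hpc.2, ?_⟩, hpc.1⟩
              omega

theorem mem_partitionP (n : Int) (hn : 0 ≤ n) (p : List Int) (m : Int) :
    p ∈ partitionP n m ↔ isPart n p ∧ ∀ x ∈ p, x ≤ m :=
  partitionGo_mem (n.toNat + 1) n m p hn (by omega)

theorem partitionGo_nodup (fuel : Nat) : ∀ (n m : Int), (partitionGo fuel n m).Nodup := by
  induction fuel with
  | zero => intro n m; exact List.nodup_nil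
  | succ fuel ih =>
    intro n m
    show (if n = 0 then [[]] else if n < 0 ∨ m = 0 then [] else _).Nodup
    split
    · simp
    · split
      · simp
      · rw [PySem.List.foldl_append_eq_flatMap, List.nil_append]
        rw [List.nodup_flatMap]
        constructor
        · intro i _
          exact (ih (n - i) i).map (fun s t h => by injection h)
        · have hnd : (PySem.List.pyRange (min n m) 0 (-1)).Nodup := by
            rw [PySem.List.pyRange_neg_one_eq_reverse, List.nodup_reverse]
            exact PySem.List.nodup_pyRange_one _ _
          refine hnd.imp ?_
          intro i j hij
          intro xs hxi hxj
          rw [List.mem_map] at hxi hxj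
          obtain ⟨s1, _, rfl⟩ := hxi
          obtain ⟨s2, _, he⟩ := hxj
          injection he with h1 _
          exact hij h1.symm

theorem nodup_partitionP (n m : Int) : (partitionP n m).Nodup := partitionGo_nodup _ n m

theorem fI_pos (k : Nat) : 0 < fI k := by
  unfold fI; exact_mod_cast Nat.factorial_pos k

theorem fI_pred (c : Nat) (hc : 1 ≤ c) : fI c = fI (c - 1) * (c : Int) := by
  unfold fI
  obtain ⟨c', rfl⟩ : ∃ c', c = c' + 1 := ⟨c - 1, by omega⟩
  rw [Nat.factorial_succ]
  push_cast
  ring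

theorem fI_succ (k : Nat) : fI (k + 1) = fI k * ((k : Int) + 1) := by
  unfold fI; rw [Nat.factorial_succ]; push_cast; ring

theorem zf_pos (t : List Int) (h1 : ∀ x ∈ t, 1 ≤ x) : 0 < zf t := by
  unfold zf
  refine mul_pos (List.prod_pos fun a ha => by have := h1 a ha; omega) ?_
  exact Finset.prod_pos fun v _ => fI_pos _

theorem zf_erase (t : List Int) (l : Int) (hl : l ∈ t) :
    zf t = zf (t.erase l) * (l * (t.count l : Int)) := by
  have hc1 : 0 < t.count l := List.count_pos_iff.2 hl
  have hprod : t.prod = l * (t.erase l).prod := (List.prod_erase hl).symm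
  have hsub : (t.erase l).toFinset ⊆ t.toFinset := by
    intro v hv
    rw [List.mem_toFinset] at hv ⊢
    exact List.mem_of_mem_erase hv
  have hstepA : ∏ v ∈ (t.erase l).toFinset, fI ((t.erase l).count v)
      = ∏ v ∈ t.toFinset, fI ((t.erase l).count v) := by
    refine Finset.prod_subset hsub ?_
    intro v _ hv
    rw [List.mem_toFinset] at hv
    rw [List.count_eq_zero_of_not_mem hv]
    rfl
  have hlmem : l ∈ t.toFinset := List.mem_toFinset.2 hl
  have hB1 : ∏ v ∈ t.toFinset, fI (t.count v)
      = fI (t.count l) * ∏ v ∈ t.toFinset.erase l, fI (t.count v) :=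
    (Finset.mul_prod_erase _ _ hlmem).symm
  have hB2 : ∏ v ∈ t.toFinset, fI ((t.erase l).count v)
      = fI (t.count l - 1) * ∏ v ∈ t.toFinset.erase l, fI (t.count v) := by
    rw [← Finset.mul_prod_erase _ _ hlmem, List.count_erase_self]
    congr 1
    refine Finset.prod_congr rfl ?_
    intro v hv
    have hvl : v ≠ l := (Finset.mem_erase.1 hv).1
    rw [List.count_erase, if_neg (by simpa using fun h => hvl h.symm)]
    simp
  have hfc : fI (t.count l) = fI (t.count l - 1) * (t.count l : Int) := fI_pred _ hc1
  have hP : (∏ v ∈ (t.erase l).toFinset, fI ((t.erase l).count v))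
      = fI (t.count l - 1) * ∏ v ∈ t.toFinset.erase l, fI (t.count v) := hstepA.trans hB2
  unfold zf
  rw [hprod, hB1, hP, hfc]
  ring

theorem sorted_desc_unique (u v : List Int) (h : u.Perm v)
    (hu : u.Pairwise (fun a b => b ≤ a)) (hv : v.Pairwise (fun a b => b ≤ a)) : u = v :=
  List.eq_of_perm_of_sorted (fun _ _ _ _ h1 h2 => le_antisymm h2 h1) hu hv h

theorem sortRev_eq (xs nt : List Int) (hperm : xs.Perm nt)
    (hnt : nt.Pairwise (fun a b => b ≤ a)) :
    PySem.List.sorted xs (fun x => x) true = nt :=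
  sorted_desc_unique _ _ ((PySem.List.sorted_perm xs _ true).trans hperm)
    (PySem.List.sorted_pairwise_rev xs _) hnt

theorem sorted_cond (k nt : List Int) (l : Int)
    (hk : k.Pairwise (fun a b => b ≤ a)) (hnt : nt.Pairwise (fun a b => b ≤ a)) :
    PySem.List.sorted (k ++ [l]) (fun x => x) true = nt ↔ l ∈ nt ∧ k = nt.erase l := by
  constructor
  · intro h
    have hperm : (k ++ [l]).Perm nt := by
      rw [← h]; exact (PySem.List.sorted_perm (k ++ [l]) _ true).symm
    have hlmem : l ∈ nt := hperm.mem_iff.1 (by simp)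
    have hkperm : k.Perm (nt.erase l) := by
      have h1 : (l :: k).Perm (l :: nt.erase l) :=
        (List.perm_append_singleton l k).symm.trans (hperm.trans (List.perm_cons_erase hlmem))
      exact h1.cons_inv
    exact ⟨hlmem, sorted_desc_unique _ _ hkperm hk (List.Pairwise.sublist List.erase_sublist hnt)⟩
  · rintro ⟨hlmem, rfl⟩
    refine sortRev_eq _ _ ?_ hnt
    exact (List.perm_append_singleton l _).trans (List.perm_cons_erase hlmem).symm

theorem isPart_erase (N : Int) (nt : List Int) (l : Int) (h : isPart N nt) (hl : l ∈ nt) :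
    isPart (N - l) (nt.erase l) := by
  obtain ⟨h1, h2, h3⟩ := h
  refine ⟨fun x hx => h1 x (List.mem_of_mem_erase hx), List.Pairwise.sublist List.erase_sublist h2, ?_⟩
  have := List.sum_erase (l := nt) (a := l) hl
  omega

theorem waysB_eq_prod (m l : Int) : waysB m l = (PySem.List.pyRange (m - l + 1) m 1).prod := by
  unfold waysB; rw [foldl_mul_int, one_mul]

theorem ways_fact (n : Nat) : ∀ l : Nat, 1 ≤ l → l ≤ n →
    waysB (n : Int) (l : Int) * fI (n - l) = fI (n - 1) := by
  intro l
  induction l with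
  | zero => omega
  | succ l ihl =>
    intro _ hln
    by_cases hl0 : l = 0
    · subst hl0
      rw [waysB_eq_prod]
      rw [show ((n : Int) - (1 : Nat) + 1) = (n : Int) by push_cast; ring]
      rw [PySem.List.pyRange_one_eq_nil le_rfl]
      simp
    · have hl1 : 1 ≤ l := by omega
      have ih := ihl hl1 (by omega)
      rw [waysB_eq_prod] at ih ⊢
      have hsplit : PySem.List.pyRange ((n : Int) - ((l : Nat) + 1 : Nat) + 1) (n : Int) 1
          = ((n : Int) - (l : Int)) :: PySem.List.pyRange ((n : Int) - (l : Int) + 1) (n : Int) 1 := by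
        rw [show ((n : Int) - ((l : Nat) + 1 : Nat) + 1) = (n : Int) - (l : Int) by push_cast; ring]
        exact PySem.List.pyRange_one_cons (by omega)
      rw [hsplit, List.prod_cons]
      have hfs : fI (n - l) = fI (n - (l + 1)) * ((n : Int) - (l : Int)) := by
        rw [fI_pred (n - l) (by omega)]
        have e1 : n - l - 1 = n - (l + 1) := by omega
        have e2 : ((n - l : Nat) : Int) = (n : Int) - (l : Int) := by omega
        rw [e1, e2]
      calc ((n : Int) - (l : Int)) * (PySem.List.pyRange ((n : Int) - (l : Int) + 1) (n : Int) 1).prod * fI (n - (l + 1))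
          = (PySem.List.pyRange ((n : Int) - (l : Int) + 1) (n : Int) 1).prod * (fI (n - (l + 1)) * ((n : Int) - (l : Int))) := by ring
        _ = (PySem.List.pyRange ((n : Int) - (l : Int) + 1) (n : Int) 1).prod * fI (n - l) := by rw [← hfs]
        _ = fI (n - 1) := ih

theorem sum_ite_mul_count (t : List Int) (a b : Int) (hmem : ∀ x ∈ t, a ≤ x ∧ x < b) :
    ((PySem.List.pyRange a b 1).map (fun l => if l ∈ t then l * (t.count l : Int) else 0)).sum
      = t.sum := by
  rw [← List.sum_toFinset _ (PySem.List.nodup_pyRange_one a b)]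
  have hsub : t.toFinset ⊆ (PySem.List.pyRange a b 1).toFinset := by
    intro v hv
    rw [List.mem_toFinset] at hv ⊢
    rw [PySem.List.mem_pyRange_one]
    exact ⟨(hmem v hv).1, (hmem v hv).2⟩
  rw [← Finset.sum_subset hsub (by
    intro x _ hx
    rw [List.mem_toFinset] at hx
    rw [if_neg hx])]
  conv_rhs => rw [Finset.sum_list_count t]
  refine Finset.sum_congr rfl ?_
  intro v hv
  rw [List.mem_toFinset] at hv
  rw [if_pos hv, nsmul_eq_mul]
  ring

theorem filter_map_sum_flatMap {α β : Type} (L : List α) (f : α → List β)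
    (P : β → Bool) (v : β → Int) :
    (((L.flatMap f).filter P).map v).sum
      = (L.map (fun l => (((f l).filter P).map v).sum)).sum := by
  induction L with
  | nil => simp
  | cons x rest ih => simp [List.flatMap_cons, List.filter_append, ih]

theorem filter_eq_of_nodup {κ : Type} [DecidableEq κ] (K : List κ) (c : κ) (hnd : K.Nodup) :
    K.filter (fun k => k = c) = if c ∈ K then [c] else [] := by
  induction K with
  | nil => simp
  | cons a rest ih =>
    have hih := ih (List.nodup_cons.1 hnd).2
    by_cases hac : a = c
    · subst hac
      rw [List.filter_cons_of_pos (by simp)]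
      rw [if_pos List.mem_cons_self, hih, if_neg (List.nodup_cons.1 hnd).1]
    · rw [List.filter_cons_of_neg (by simpa using hac), hih]
      by_cases hc : c ∈ rest
      · rw [if_pos hc, if_pos (List.mem_cons_of_mem a hc)]
      · rw [if_neg hc, if_neg (by
          intro hmem
          rcases List.mem_cons.1 hmem with h | h
          · exact hac h.symm
          · exact hc h)]

theorem map_sum_flatMap {α β : Type} (L : List α) (f : α → List β) (v : β → Int) :
    (((L.flatMap f)).map v).sum = (L.map (fun l => ((f l).map v).sum)).sum := by
  induction L with
  | nil => simp
  | cons x rest ih => simp [List.flatMap_cons, ih]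

theorem dpD_spec (m : Nat) :
    (dpD m).keys.Nodup
    ∧ (∀ k, k ∈ (dpD m).keys ↔ isPart (m : Int) k)
    ∧ (∀ k, isPart (m : Int) k → (dpD m).getD k 0 * zf k = fI m)
    ∧ (dpD m).values.sum = fI m := by
  induction m using Nat.strong_induction_on with
  | _ m IH =>
    cases m with
    | zero =>
      have hkeys : (dpD 0).keys = [[]] := by decide
      refine ⟨by rw [hkeys]; simp, ?_, ?_, by decide⟩
      · intro k
        rw [hkeys, List.mem_singleton]
        rw [show ((0 : Nat) : Int) = 0 by norm_num]
        exact (isPart_zero k).symm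
      · intro k hk
        have hk0 : k = [] := (isPart_zero k).1 (by exact_mod_cast hk)
        subst hk0
        have h1 : (dpD 0).getD ([] : List Int) 0 = 1 := by decide
        rw [h1]
        simp [zf, fI]
    | succ m =>
      have IHle : ∀ j, j ≤ m →
          ((dpD j).keys.Nodup
          ∧ (∀ k, k ∈ (dpD j).keys ↔ isPart (j : Int) k)
          ∧ (∀ k, isPart (j : Int) k → (dpD j).getD k 0 * zf k = fI j)
          ∧ (dpD j).values.sum = fI j) := fun j hj => IH j (by omega)
      rw [dpD_succ_eq m]
      push_cast
      -- membership in the contribution key list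
      have hCmem : ∀ k : List Int, k ∈ (contribs m).map (·.1) ↔
          ∃ l : Int, (1 ≤ l ∧ l < (m : Int) + 1 + 1) ∧
            ∃ t, t ∈ (dpD (m + 1 - l.toNat)).keys ∧
              PySem.List.sorted (t ++ [l]) (fun x => x) true = k := by
        intro k
        unfold contribs
        constructor
        · intro hk
          rw [List.mem_map] at hk
          obtain ⟨q, hq, rfl⟩ := hk
          rw [List.mem_flatMap] at hq
          obtain ⟨l, hl, hq⟩ := hq
          rw [PySem.List.mem_pyRange_one] at hl
          rw [List.mem_map] at hq
          obtain ⟨tc, htc, rfl⟩ := hq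
          refine ⟨l, hl, tc.1, ?_, rfl⟩
          exact PySem.Dict.mem_keys_of_mem_items _ htc
        · rintro ⟨l, hl, t, ht, hs⟩
          rw [List.mem_map]
          have hnod : (dpD (m + 1 - l.toNat)).keys.Nodup := (IHle _ (by omega)).1
          refine ⟨(PySem.List.sorted (t ++ [l]) (fun x => x) true,
            waysB ((m : Int) + 1) l * (dpD (m + 1 - l.toNat)).getD t 0), ?_, by rw [hs]⟩
          rw [List.mem_flatMap]
          refine ⟨l, by rw [PySem.List.mem_pyRange_one]; exact hl, ?_⟩
          rw [List.mem_map]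
          refine ⟨(t, (dpD (m + 1 - l.toNat)).getD t 0), ?_, rfl⟩
          rw [PySem.Dict.items_eq_map_keys _ hnod 0, List.mem_map]
          exact ⟨t, ht, rfl⟩
      have hKeys : ∀ k, k ∈ ((contribs m).foldl upsert PySem.Dict.empty).keys ↔
          isPart ((m : Int) + 1) k := by
        intro k
        rw [keys_foldl_upsert, PySem.Set.mem_ofList, hCmem]
        constructor
        · rintro ⟨l, hl, t, ht, rfl⟩
          have hIj := IHle (m + 1 - l.toNat) (by omega)
          have htp : isPart ((m + 1 - l.toNat : Nat) : Int) t := (hIj.2.1 t).1 ht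
          obtain ⟨h1, h2, h3⟩ := htp
          have hperm := PySem.List.sorted_perm (t ++ [l]) (fun x => x) true
          refine ⟨?_, PySem.List.sorted_pairwise_rev _ _, ?_⟩
          · intro x hx
            have hx' := hperm.mem_iff.1 hx
            rcases List.mem_append.1 hx' with hx1 | hx2
            · exact h1 x hx1
            · rw [List.mem_singleton] at hx2; omega
          · rw [hperm.sum_eq]
            rw [List.sum_append, List.sum_singleton, h3]
            omega
        · intro hk
          obtain ⟨h1, h2, h3⟩ := hk
          have hne : k ≠ [] := by
            intro he; rw [he] at h3; simp at h3; omega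
          obtain ⟨x, rest, rfl⟩ := List.exists_cons_of_ne_nil hne
          have hxmem : x ∈ x :: rest := List.mem_cons_self
          have hx1 : 1 ≤ x := h1 x hxmem
          have hxsum : x ≤ (x :: rest).sum := elem_le_sum _ h1 x hxmem
          refine ⟨x, ⟨hx1, by omega⟩, (x :: rest).erase x, ?_, ?_⟩
          · have hIj := IHle (m + 1 - x.toNat) (by omega)
            rw [hIj.2.1]
            have := isPart_erase ((m : Int) + 1) (x :: rest) x ⟨h1, h2, h3⟩ hxmem
            have hcast : ((m + 1 - x.toNat : Nat) : Int) = (m : Int) + 1 - x := by omega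
            rw [hcast]
            exact this
          · exact (sorted_cond _ _ x (List.Pairwise.sublist List.erase_sublist h2) h2).2
              ⟨hxmem, rfl⟩
      refine ⟨nodup_keys_foldl_upsert _, hKeys, ?_, ?_⟩
      · -- the counting identity
        intro nt hnt
        rw [getD_foldl_upsert, PySem.Dict.getD_empty, zero_add]
        unfold contribs
        rw [filter_map_sum_flatMap]
        have hntsum : nt.sum = (m : Int) + 1 := hnt.2.2
        have hinner : ∀ l ∈ PySem.List.pyRange 1 ((m : Int) + 1 + 1) 1,
            ((((dpD (m + 1 - l.toNat)).items.map (fun tc =>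
                (PySem.List.sorted (tc.1 ++ [l]) (fun x => x) true,
                  waysB ((m : Int) + 1) l * tc.2))).filter
                (fun p => p.1 = nt)).map (·.2)).sum
            = if l ∈ nt then
                waysB ((m : Int) + 1) l * (dpD (m + 1 - l.toNat)).getD (nt.erase l) 0
              else 0 := by
          intro l hl
          rw [PySem.List.mem_pyRange_one] at hl
          have hIj := IHle (m + 1 - l.toNat) (by omega)
          rw [List.filter_map, List.map_map]
          rw [PySem.Dict.items_eq_map_keys _ hIj.1 0]
          rw [List.filter_map, List.map_map]
          by_cases hlnt : l ∈ nt
          · rw [if_pos hlnt]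
            rw [List.filter_congr (q := fun k => decide (k = nt.erase l)) ?_]
            · rw [filter_eq_of_nodup _ _ hIj.1]
              rw [if_pos ?_]
              · simp
              · rw [hIj.2.1]
                have := isPart_erase ((m : Int) + 1) nt l hnt hlnt
                have hlle : l ≤ (m : Int) + 1 := hntsum ▸ elem_le_sum nt hnt.1 l hlnt
                have hcast : ((m + 1 - l.toNat : Nat) : Int) = (m : Int) + 1 - l := by omega
                rw [hcast]
                exact this
            · intro k hk
              have hkp : isPart ((m + 1 - l.toNat : Nat) : Int) k := (hIj.2.1 k).1 hk
              show decide (PySem.List.sorted (k ++ [l]) (fun x => x) true = nt) = _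
              apply decide_eq_decide.2
              rw [sorted_cond k nt l hkp.2.1 hnt.2.1]
              constructor
              · exact And.right
              · exact fun h => ⟨hlnt, h⟩
          · rw [if_neg hlnt]
            rw [List.filter_congr (q := fun _ => false) ?_]
            · simp
            · intro k hk
              have hkp : isPart ((m + 1 - l.toNat : Nat) : Int) k := (hIj.2.1 k).1 hk
              show decide (PySem.List.sorted (k ++ [l]) (fun x => x) true = nt) = _
              simp only [decide_eq_false_iff_not]
              intro he
              exact hlnt ((sorted_cond k nt l hkp.2.1 hnt.2.1).1 he).1
        rw [List.map_congr_left hinner]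
        rw [← List.sum_map_mul_right]
        have hterm : ∀ l ∈ PySem.List.pyRange 1 ((m : Int) + 1 + 1) 1,
            (if l ∈ nt then
                waysB ((m : Int) + 1) l * (dpD (m + 1 - l.toNat)).getD (nt.erase l) 0
              else 0) * zf nt
            = fI m * (if l ∈ nt then l * (nt.count l : Int) else 0) := by
          intro l hl
          rw [PySem.List.mem_pyRange_one] at hl
          by_cases hlnt : l ∈ nt
          · rw [if_pos hlnt, if_pos hlnt]
            have hlle : l ≤ (m : Int) + 1 := hntsum ▸ elem_le_sum nt hnt.1 l hlnt
            have hcast : ((m + 1 - l.toNat : Nat) : Int) = (m : Int) + 1 - l := by omega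
            have hep : isPart ((m + 1 - l.toNat : Nat) : Int) (nt.erase l) := by
              rw [hcast]; exact isPart_erase _ nt l hnt hlnt
            have hIj := IHle (m + 1 - l.toNat) (by omega)
            have hgd := hIj.2.2.1 (nt.erase l) hep
            rw [zf_erase nt l hlnt]
            have hw : waysB ((m : Int) + 1) l * fI (m + 1 - l.toNat) = fI m := by
              have := ways_fact (m + 1) l.toNat (by omega) (by omega)
              rw [show ((l.toNat : Nat) : Int) = l by omega,
                show (((m + 1 : Nat)) : Int) = (m : Int) + 1 by push_cast; ring] at this
              rw [show (m + 1 - l.toNat : Nat) = m + 1 - l.toNat from rfl]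
              rw [show (m + 1 : Nat) - 1 = m by omega] at this
              exact this
            calc waysB ((m : Int) + 1) l * (dpD (m + 1 - l.toNat)).getD (nt.erase l) 0 *
                  (zf (nt.erase l) * (l * (nt.count l : Int)))
                = waysB ((m : Int) + 1) l *
                    ((dpD (m + 1 - l.toNat)).getD (nt.erase l) 0 * zf (nt.erase l)) *
                    (l * (nt.count l : Int)) := by ring
              _ = waysB ((m : Int) + 1) l * fI (m + 1 - l.toNat) * (l * (nt.count l : Int)) := by
                  rw [hgd]
              _ = fI m * (l * (nt.count l : Int)) := by rw [hw]
          · rw [if_neg hlnt, if_neg hlnt]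
            ring
        rw [List.map_congr_left hterm]
        rw [PySem.List.sum_map_const_mul_int]
        rw [sum_ite_mul_count nt 1 ((m : Int) + 1 + 1) ?_]
        · rw [hntsum, ← fI_succ]
        · intro x hx
          have := hnt.1 x hx
          have := hntsum ▸ elem_le_sum nt hnt.1 x hx
          omega
      · -- the total count is (m+1)!
        rw [sum_values_foldl_upsert]
        unfold contribs
        rw [map_sum_flatMap]
        have hinner : ∀ l ∈ PySem.List.pyRange 1 ((m : Int) + 1 + 1) 1,
            (((dpD (m + 1 - l.toNat)).items.map (fun tc =>
                (PySem.List.sorted (tc.1 ++ [l]) (fun x => x) true,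
                  waysB ((m : Int) + 1) l * tc.2))).map (·.2)).sum
            = fI m := by
          intro l hl
          rw [PySem.List.mem_pyRange_one] at hl
          have hIj := IHle (m + 1 - l.toNat) (by omega)
          rw [List.map_map]
          show ((dpD (m + 1 - l.toNat)).items.map
            (fun tc => waysB ((m : Int) + 1) l * tc.2)).sum = fI m
          rw [PySem.List.sum_map_const_mul_int]
          have hv : ((dpD (m + 1 - l.toNat)).items.map (·.2)).sum
              = (dpD (m + 1 - l.toNat)).values.sum := rfl
          rw [hv, hIj.2.2.2]
          have := ways_fact (m + 1) l.toNat (by omega) (by omega)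
          rw [show ((l.toNat : Nat) : Int) = l by omega,
            show (((m + 1 : Nat)) : Int) = (m : Int) + 1 by push_cast; ring] at this
          rw [show (m + 1 : Nat) - 1 = m by omega] at this
          exact this
        rw [List.map_congr_left hinner]
        rw [PySem.List.sum_map_const_int]
        rw [PySem.List.length_pyRange_one]
        rw [show (((m : Int) + 1 + 1) - 1).toNat = m + 1 by omega]
        rw [fI_succ]
        push_cast
        ring

-- Dict.modify on an absent key appends (x, f 0), i.e. is insert x 1 here
theorem modify_absent (d : PySem.Dict Int Int) (x : Int) (h : ¬ d.contains x) :
    d.modify x 0 (· + 1) = d.insert x 1 := by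
  simp only [PySem.Dict.contains, List.any_eq_true, beq_iff_eq, Prod.exists, exists_and_right,
    exists_eq_right, not_exists] at h
  have hf : List.find? (fun p => p.1 == x) d.items = none :=
    List.find?_eq_none.2 (fun p hp => by
      simpa using fun hpx => h p.2 (by rw [← hpx]; exact hp))
  have hg : d.getD x 0 = 0 := by
    simp [PySem.Dict.getD, PySem.Dict.get?, hf]
  simp [PySem.Dict.modify, PySem.Dict.insert, hg]

-- A's hand-rolled Counter is collections.Counter
theorem counterA_eq (y : List Int) : counterA y = PySem.Dict.counter y := by
  unfold counterA
  rw [PySem.Dict.counter_eq_foldl]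
  apply PySem.List.foldl_congr_mem
  intro d x _
  by_cases hc : d.contains x
  · simp [hc]
  · simp [hc, modify_absent d x hc]

theorem foldl_floordiv (S : List Int) (dv : Int → Int) (a : Int)
    (hpos : ∀ i ∈ S, 0 < dv i) :
    S.foldl (fun c i => PySem.Int.floordiv c (dv i)) a
      = PySem.Int.floordiv a ((S.map dv).prod) := by
  induction S generalizing a with
  | nil => simp
  | cons x rest ih =>
    rw [List.foldl_cons, ih _ (fun i hi => hpos i (List.mem_cons_of_mem x hi))]
    have hx : 0 < dv x := hpos x List.mem_cons_self
    have hr : 0 < (rest.map dv).prod :=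
      List.prod_pos (by
        intro a ha
        rw [List.mem_map] at ha
        obtain ⟨i, hi, rfl⟩ := ha
        exact hpos i (List.mem_cons_of_mem x hi))
    rw [PySem.Int.floordiv_eq_ediv_of_pos hr, PySem.Int.floordiv_eq_ediv_of_pos hx,
      PySem.Int.floordiv_eq_ediv_of_pos (by simpa using mul_pos hx hr)]
    rw [List.map_cons, List.prod_cons]
    exact Int.ediv_ediv_of_nonneg (le_of_lt hx)

theorem cyA_eq_fdiv (t : List Int) (n : Int) (h1 : ∀ x ∈ t, 1 ≤ x) :
    cyA t n = PySem.Int.floordiv (factA n) (zf t) := by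
  unfold cyA
  simp only []
  have hstep : (PySem.Set.ofList t).foldl
      (fun conj i => PySem.Int.floordiv conj
        (i ^ ((counterA t).getD i 0).toNat * factA ((counterA t).getD i 0)))
      (factA n)
    = (PySem.Set.ofList t).foldl
      (fun conj i => PySem.Int.floordiv conj (i ^ t.count i * fI (t.count i))) (factA n) := by
    apply PySem.List.foldl_congr_mem
    intro c i hi
    rw [counterA_eq, PySem.Dict.getD_counter]
    rw [show ((t.count i : Int)).toNat = t.count i by omega]
    rw [factA_natCast]
  rw [hstep]
  rw [foldl_floordiv _ _ _ (fun i hi => by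
    have hit : i ∈ t := (PySem.Set.mem_ofList _ _).1 hi
    have := h1 i hit
    exact mul_pos (pow_pos (by omega) _) (fI_pos _))]
  congr 1
  rw [← List.prod_toFinset _ (PySem.Set.nodup_ofList t)]
  have hfs : (PySem.Set.ofList t : List Int).toFinset = t.toFinset := by
    apply Finset.ext
    intro v
    rw [List.mem_toFinset, List.mem_toFinset, PySem.Set.mem_ofList]
  rw [hfs]
  rw [Finset.prod_mul_distrib]
  unfold zf
  congr 1
  exact (Finset.prod_list_count t).symm

theorem cyA_eq_getD (t : List Int) (n : Nat) (ht : isPart (n : Int) t) :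
    cyA t (n : Int) = (dpD n).getD t 0 := by
  rw [cyA_eq_fdiv t _ ht.1, factA_natCast]
  have hgd := (dpD_spec n).2.2.1 t ht
  have hz := zf_pos t ht.1
  rw [← hgd, PySem.Int.floordiv_eq_ediv_of_pos hz, Int.mul_ediv_cancel _ (ne_of_gt hz)]

theorem keys_perm_partitionP (n : Nat) :
    (dpD n).keys.Perm (partitionP (n : Int) (n : Int)) := by
  refine (List.perm_ext_iff_of_nodup (dpD_spec n).1 (nodup_partitionP _ _)).2 ?_
  intro p
  rw [(dpD_spec n).2.1 p, mem_partitionP (n : Int) (by positivity) p (n : Int)]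
  constructor
  · intro hp
    refine ⟨hp, ?_⟩
    intro x hx
    have := elem_le_sum p hp.1 x hx
    rw [hp.2.2] at this
    exact this
  · exact And.left

-- ===== VERDICT (by name: the statement is the Claim_ definition above) =====
theorem solution_spec : Claim_equal_solution := by
  intro w h_ s _ hpre
  obtain ⟨hw, hh⟩ := hpre
  obtain ⟨W, rfl⟩ : ∃ W : Nat, w = (W : Int) := ⟨w.toNat, by omega⟩
  obtain ⟨H, rfl⟩ : ∃ H : Nat, h_ = (H : Int) := ⟨h_.toNat, by omega⟩
  simp only [Spec_solution, solution, solution_alt]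
  rw [cycleTypeCounts_eq _ hw, cycleTypeCounts_eq _ hh, Int.toNat_natCast, Int.toNat_natCast]
  have hndW := (dpD_spec W).1
  have hndH := (dpD_spec H).1
  -- denominators agree: sum of class sizes = n!
  have hfw : (dpD W).values.foldl (· + ·) 0 = factA (W : Int) := by
    rw [PySem.List.foldl_add (g := fun x => x), List.map_id', (dpD_spec W).2.2.2, factA_natCast]
    ring
  have hfh : (dpD H).values.foldl (· + ·) 0 = factA (H : Int) := by
    rw [PySem.List.foldl_add (g := fun x => x), List.map_id', (dpD_spec H).2.2.2, factA_natCast]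
    ring
  rw [hfw, hfh]
  -- items as key lists, DP counts as cy values
  rw [PySem.Dict.items_eq_map_keys _ hndW 0, PySem.Dict.items_eq_map_keys _ hndH 0]
  simp only [List.foldl_map]
  congr 2
  have hbody : ((dpD W).keys).foldl (fun tot k =>
      ((dpD H).keys).foldl (fun tot k2 =>
        tot + (dpD W).getD k 0 * (dpD H).getD k2 0 *
          s ^ (k.foldl (fun e a => k2.foldl (fun e b => e + pyGcd a b) e) 0).toNat) tot) 0
    = ((dpD W).keys).foldl (fun tot k =>
      ((dpD H).keys).foldl (fun tot k2 =>
        tot + cyA k (W : Int) * cyA k2 (H : Int) *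
          s ^ (k.foldl (fun e a => k2.foldl (fun e b => e + pyGcd a b) e) 0).toNat) tot) 0 := by
    apply PySem.List.foldl_congr_mem
    intro tot k hk
    apply PySem.List.foldl_congr_mem
    intro tot2 k2 hk2
    rw [cyA_eq_getD k W (((dpD_spec W).2.1 k).1 hk),
      cyA_eq_getD k2 H (((dpD_spec H).2.1 k2).1 hk2)]
  rw [hbody]
  -- turn both nested folds into sums and use the permutation of key lists
  simp only [PySem.List.foldl_add]
  simp only [zero_add]
  have hpermW := keys_perm_partitionP W
  have hpermH := keys_perm_partitionP H
  refine Eq.trans ?_ ((hpermW.map _).sum_eq.symm)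
  refine congrArg List.sum (List.map_congr_left ?_)
  intro k _
  exact ((hpermH.map _).sum_eq).symm
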